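-- pv_equiv track=rewrite | github.com/paweln1975/python-matt | 02-intermediate/09-iterator/04-enumerate/solutions/solution-g.py | myenumerate
-- ===== SOURCE A (Python) =====
-- def myenumerate(iterable, start=0):
--     current = start
--     result = []
--
--     for element in iterable:
--         row = (current, element)
--         result.append(row)
--         current += 1
--
--     return result
-- ===== SOURCE B (Python) =====
-- def myenumerate(iterable, start=0):
--     items = list(iterable)
--
--     def go(lo, hi):
--         if hi - lo == 0:
--             return []
--         if hi - lo == 1:
--             return [(start + lo, items[lo])]
--         mid = (lo + hi) // 2
--         return go(lo, mid) + go(mid, hi)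
--
--     return go(0, len(items))
-- ===== Notes on version B (the rewrite author's own statement) =====
-- stated objective: alternative
-- what changed: Replaces the counter-and-append loop with a divide-and-conquer recursion: it splits the index range in half, enumerates each half independently (each index computed from its position, no running counter), and concatenates the results.
import Mathlib
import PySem

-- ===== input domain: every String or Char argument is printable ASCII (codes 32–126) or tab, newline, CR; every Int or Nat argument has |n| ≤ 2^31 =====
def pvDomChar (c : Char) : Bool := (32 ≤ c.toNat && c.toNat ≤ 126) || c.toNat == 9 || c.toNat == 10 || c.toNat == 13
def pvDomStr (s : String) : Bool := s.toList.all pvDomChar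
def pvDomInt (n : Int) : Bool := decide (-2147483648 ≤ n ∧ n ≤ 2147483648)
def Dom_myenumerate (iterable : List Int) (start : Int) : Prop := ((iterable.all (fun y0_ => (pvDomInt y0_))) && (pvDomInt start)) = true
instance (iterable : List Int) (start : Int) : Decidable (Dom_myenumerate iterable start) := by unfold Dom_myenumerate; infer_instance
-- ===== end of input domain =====

-- B (alternative): divide-and-conquer — enumerate each half of the index range and concatenate, instead of A's counter-and-append loop; same cost class, no running counter.


-- ===== PORT A =====
def myenumerate (iterable : List Int) (start : Int) : List (Int × Int) :=
  (iterable.foldl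
    (fun (st : Int × List (Int × Int)) element =>
      (st.1 + 1, st.2 ++ [(st.1, element)]))
    (start, [])).2

-- ===== PORT B =====
-- go(lo, hi): lo, hi are nonnegative Python ints (Nat here); (lo+hi)//2 on Nats is
-- Python's floor division. items[lo] is read as getD lo 0: at the leaf lo < hi ≤ items.length
-- for every call reachable from go 0 items.length, so it is exactly Python's items[lo].
def goEnum (items : List Int) (start : Int) (lo hi : Nat) : List (Int × Int) :=
  if hi - lo = 0 then []
  else if hi - lo = 1 then [(start + lo, items.getD lo 0)]
  else goEnum items start lo ((lo + hi) / 2) ++ goEnum items start ((lo + hi) / 2) hi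
termination_by hi - lo
decreasing_by
  all_goals omega

def myenumerate_alt (iterable : List Int) (start : Int) : List (Int × Int) :=
  goEnum iterable start 0 iterable.length

-- ===== PRECONDITION & SPEC =====
def Spec_myenumerate (iterable : List Int) (start : Int) (out : List (Int × Int)) : Prop := out = myenumerate_alt iterable start
instance (iterable : List Int) (start : Int) (out : List (Int × Int)) : Decidable (Spec_myenumerate iterable start out) := by unfold Spec_myenumerate; infer_instance

-- ===== CLAIM (what is proved, stated in full; the proofs are below) =====
def Claim_equal_myenumerate : Prop := ∀ (iterable : List Int) (start : Int), Dom_myenumerate iterable start → Spec_myenumerate iterable start (myenumerate iterable start)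

-- ===== LEMMAS AND PROOFS =====

-- goEnum produces the (start+i, items[i]) pairs for i in [lo, hi).
theorem goEnum_eq (items : List Int) (start : Int) (lo hi : Nat) :
    goEnum items start lo hi
      = (List.range' lo (hi - lo)).map (fun (i : Nat) => (start + (i : Int), items.getD i 0)) := by
  induction lo, hi using goEnum.induct with
  | case1 lo hi h => simp [goEnum, h]
  | case2 lo hi h h1 => simp [goEnum, h1]
  | case3 lo hi h h1 ih1 ih2 =>
    rw [goEnum]
    simp only [h, h1, if_false, ih1, ih2]
    rw [← List.map_append]
    congr 1
    have hd := Nat.div_add_mod (lo + hi) 2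
    have hm := Nat.mod_lt (lo + hi) (by norm_num : 0 < 2)
    have key := @List.range'_append lo ((lo + hi) / 2 - lo) (hi - (lo + hi) / 2) 1
    have e1 : lo + 1 * ((lo + hi) / 2 - lo) = (lo + hi) / 2 := by omega
    have e2 : ((lo + hi) / 2 - lo) + (hi - (lo + hi) / 2) = hi - lo := by omega
    rw [e1, e2] at key
    exact key

-- A's foldl with accumulator acc appends the pairs for indices [0, xs.length) shifted to start.
theorem foldA (xs : List Int) (start : Int) (acc : List (Int × Int)) :
    (xs.foldl
      (fun (st : Int × List (Int × Int)) element =>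
        (st.1 + 1, st.2 ++ [(st.1, element)]))
      (start, acc)).2
      = acc ++ (List.range' 0 xs.length).map (fun (i : Nat) => (start + (i : Int), xs.getD i 0)) := by
  induction xs generalizing start acc with
  | nil => simp
  | cons x xs ih =>
    simp only [List.foldl_cons, ih]
    rw [List.append_assoc]
    congr 1
    rw [List.length_cons, List.range'_succ, List.map_cons, List.singleton_append]
    congr 1
    · simp
    · rw [List.range'_eq_map_range, List.range'_eq_map_range, List.map_map, List.map_map]
      refine List.map_congr_left ?_
      intro i _
      simp only [Function.comp_apply, Nat.zero_add, Nat.add_comm 1 i,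
        Prod.mk.injEq]
      refine ⟨by push_cast; ring, rfl⟩

-- ===== VERDICT (by name: the statement is the Claim_ definition above) =====
theorem myenumerate_spec : Claim_equal_myenumerate := by
  intro iterable start _
  unfold Spec_myenumerate myenumerate myenumerate_alt
  rw [goEnum_eq, Nat.sub_zero, foldA]
  simp
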